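-- pv_equiv track=rewrite | github.com/sydneynpark/advent-of-code | Day09_EncodingError/solution.py | find_contiguous_values
-- ===== SOURCE A (Python) =====
-- def find_contiguous_values(values):
--
--     first_contiguous_index = None
--     last_contiguous_index = None
--
--     for i in range(len(values) - 1):
--
--         # Haven't found any contiguous yet. Look for one.
--         if first_contiguous_index is None:
--             if values[i] + 1 == values[i+1]:
--                 first_contiguous_index = i
--                 last_contiguous_index = i+1
--
--         # We have already found a contiguous. Stretch the range as long as you keep finding contiguous vals.
--         else:
--             if values[i] + 1 == values[i+1]:
--                 last_contiguous_index = i+1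
--
--     return values[first_contiguous_index], values[last_contiguous_index]
-- ===== SOURCE B (Python) =====
-- def find_contiguous_values(values):
--     pairs = list(zip(values, values[1:]))
--     first = next(a for a, b in pairs if a + 1 == b)
--     last = next(b for a, b in reversed(pairs) if a + 1 == b)
--     return first, last
-- ===== Notes on version B (the rewrite author's own statement) =====
-- stated objective: simpler
-- what changed: Instead of one index loop threading a two-Option state over all pairs, B zips the list into adjacent pairs once and takes the first matching pair's left value by a forward short-circuit scan and the last matching pair's right value by a reversed short-circuit scan.
-- outside the precondition, e.g. on find_contiguous_values([1, 3, 5]): A raises TypeError, B raises StopIteration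
import Mathlib
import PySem

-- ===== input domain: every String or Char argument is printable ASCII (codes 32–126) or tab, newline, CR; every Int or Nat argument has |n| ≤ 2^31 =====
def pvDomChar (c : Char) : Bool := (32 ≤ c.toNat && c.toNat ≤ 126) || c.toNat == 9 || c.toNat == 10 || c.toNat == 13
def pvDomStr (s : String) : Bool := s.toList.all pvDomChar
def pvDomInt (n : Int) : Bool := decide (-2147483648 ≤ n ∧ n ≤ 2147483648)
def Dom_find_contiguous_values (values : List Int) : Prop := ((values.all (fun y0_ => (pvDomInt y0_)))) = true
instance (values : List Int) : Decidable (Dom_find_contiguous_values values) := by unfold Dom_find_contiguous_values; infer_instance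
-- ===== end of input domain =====

-- B replaces A's single index loop carrying a two-Option index state by a zip into adjacent
-- pairs plus two short-circuit scans (forward for the first value, reversed for the last):
-- simpler, same O(n) cost. A and B both raise (TypeError / StopIteration) when no adjacent
-- +1 pair exists; Pre_ excludes exactly those inputs.


-- ===== PORT A =====
-- literal port: loop over range(len(values)-1) threading (first_contiguous_index, last_contiguous_index);
-- values[i] is pyGetD (always in range for the indices the loop touches); the final
-- values[None] (TypeError when no pair was found) is excluded by Pre_ (default (0,0) there).
def find_contiguous_values (values : List Int) : Int × Int :=
  let st := (PySem.List.pyRange 0 ((values.length : Int) - 1) 1).foldl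
    (fun (s : Option Int × Option Int) i =>
      match s.1 with
      | none =>
        if PySem.List.pyGetD values i 0 + 1 = PySem.List.pyGetD values (i + 1) 0 then
          (some i, some (i + 1))
        else s
      | some _ =>
        if PySem.List.pyGetD values i 0 + 1 = PySem.List.pyGetD values (i + 1) 0 then
          (s.1, some (i + 1))
        else s)
    (none, none)
  match st with
  | (some f, some l) => (PySem.List.pyGetD values f 0, PySem.List.pyGetD values l 0)
  | _ => (0, 0)

-- ===== PORT B =====
-- next(a for a, b in pairs if a + 1 == b): first short-circuit scan
def pvFirstHit : List (Int × Int) → Option Int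
  | [] => none
  | (a, b) :: rest => if a + 1 = b then some a else pvFirstHit rest

-- next(b for a, b in reversed(pairs) if a + 1 == b): scan of the reversed pair list
def pvLastHit : List (Int × Int) → Option Int
  | [] => none
  | (a, b) :: rest => if a + 1 = b then some b else pvLastHit rest

-- zip(values, values[1:]) = values.zip values.tail (exact for lists); none = StopIteration,
-- excluded by Pre_ (default 0 there).
def find_contiguous_values_alt (values : List Int) : Int × Int :=
  let pairs := values.zip values.tail
  ((pvFirstHit pairs).getD 0, (pvLastHit pairs.reverse).getD 0)

-- ===== PRECONDITION & SPEC =====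
-- Pre_ excludes exactly the inputs with no adjacent +1 pair: there A raises TypeError
-- (values[None]) and B raises StopIteration (empty generator).
def Pre_find_contiguous_values (values : List Int) : Prop :=
  ∃ p ∈ values.zip values.tail, p.1 + 1 = p.2
instance (values : List Int) : Decidable (Pre_find_contiguous_values values) := by
  unfold Pre_find_contiguous_values; infer_instance

def pvWitness_find_contiguous_values : List Int := [1, 2]

def Spec_find_contiguous_values (values : List Int) (out : Int × Int) : Prop := out = find_contiguous_values_alt values
instance (values : List Int) (out : Int × Int) : Decidable (Spec_find_contiguous_values values out) := by unfold Spec_find_contiguous_values; infer_instance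

-- ===== CLAIM (what is proved, stated in full; the proofs are below) =====
def Claim_equal_find_contiguous_values : Prop := ∀ (values : List Int), Dom_find_contiguous_values values → Pre_find_contiguous_values values → Spec_find_contiguous_values values (find_contiguous_values values)

-- ===== LEMMAS AND PROOFS =====

-- first index (into the pair list) of a +1 pair
def pvFIdx : List (Int × Int) → Option Nat
  | [] => none
  | p :: r => if p.1 + 1 = p.2 then some 0 else (pvFIdx r).map (· + 1)

-- last index (into the pair list) of a +1 pair
def pvLIdx : List (Int × Int) → Option Nat
  | [] => none
  | p :: r =>
    match pvLIdx r with
    | some j => some (j + 1)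
    | none => if p.1 + 1 = p.2 then some 0 else none

lemma pvFIdx_lt {l : List (Int × Int)} {j : Nat} (h : pvFIdx l = some j) : j < l.length := by
  induction l generalizing j with
  | nil => simp [pvFIdx] at h
  | cons p r ih =>
    simp only [pvFIdx] at h
    rw [show (p :: r).length = r.length + 1 from rfl]
    split at h
    · simp at h
      omega
    · cases hr : pvFIdx r with
      | none => simp [hr] at h
      | some k =>
        simp [hr] at h
        have := ih hr
        omega

lemma pvLIdx_lt {l : List (Int × Int)} {j : Nat} (h : pvLIdx l = some j) : j < l.length := by
  induction l generalizing j with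
  | nil => simp [pvLIdx] at h
  | cons p r ih =>
    simp only [pvLIdx] at h
    rw [show (p :: r).length = r.length + 1 from rfl]
    cases hr : pvLIdx r with
    | some k =>
      rw [hr] at h
      simp at h
      have := ih hr
      omega
    | none =>
      rw [hr] at h
      simp only [] at h
      by_cases hc : p.1 + 1 = p.2
      · rw [if_pos hc] at h
        simp at h
        omega
      · rw [if_neg hc] at h
        simp at h

lemma pvFIdx_snoc (l : List (Int × Int)) (p : Int × Int) :
    pvFIdx (l ++ [p]) =
      match pvFIdx l with
      | some j => some j
      | none => if p.1 + 1 = p.2 then some l.length else none := by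
  induction l with
  | nil => simp [pvFIdx]
  | cons q r ih =>
    simp only [List.cons_append, pvFIdx, ih]
    by_cases hq : q.1 + 1 = q.2
    · simp [hq]
    · cases hr : pvFIdx r with
      | none => by_cases hp : p.1 + 1 = p.2 <;> simp [hq, hp, List.length_cons]
      | some k => simp [hq]

lemma pvLIdx_snoc (l : List (Int × Int)) (p : Int × Int) :
    pvLIdx (l ++ [p]) = if p.1 + 1 = p.2 then some l.length else pvLIdx l := by
  induction l with
  | nil => simp [pvLIdx]
  | cons q r ih =>
    simp only [List.cons_append, pvLIdx, ih]
    by_cases hp : p.1 + 1 = p.2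
    · simp [hp, List.length_cons]
    · simp [hp]

lemma pvFIdx_none_iff_pvLIdx_none (l : List (Int × Int)) :
    pvFIdx l = none ↔ pvLIdx l = none := by
  induction l with
  | nil => simp [pvFIdx, pvLIdx]
  | cons p r ih =>
    simp only [pvFIdx, pvLIdx]
    cases hr : pvFIdx r <;> cases hl : pvLIdx r <;> simp_all <;> split <;> simp_all

lemma pvFirstHit_eq (l : List (Int × Int)) :
    pvFirstHit l = (pvFIdx l).map (fun j => (l.getD j (0, 0)).1) := by
  induction l with
  | nil => rfl
  | cons p r ih =>
    simp only [pvFirstHit, pvFIdx]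
    by_cases hp : p.1 + 1 = p.2
    · simp [hp]
    · cases hr : pvFIdx r with
      | none => simp [hp, hr, ih]
      | some k => simp [hp, hr, ih]

lemma pvLastHit_reverse_eq (l : List (Int × Int)) :
    pvLastHit l.reverse = (pvLIdx l).map (fun j => (l.getD j (0, 0)).2) := by
  induction l using List.reverseRecOn with
  | nil => rfl
  | append_singleton r p ih =>
    rw [pvLIdx_snoc, List.reverse_append]
    simp only [List.reverse_singleton, List.singleton_append, pvLastHit]
    by_cases hp : p.1 + 1 = p.2
    · simp [hp, List.getD_eq_getElem?_getD]
    · rw [if_neg hp, if_neg hp, ih]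
      cases hr : pvLIdx r with
      | none => simp
      | some k =>
        have hk := pvLIdx_lt hr
        simp [List.getD_eq_getElem?_getD, List.getElem?_append_left hk]

-- the pair list indexes the values: pairs[j] = (values[j], values[j+1])
lemma pvPairs_getD (values : List Int) (j : Nat) (hj : j < (values.zip values.tail).length) :
    (values.zip values.tail).getD j (0, 0) = (values.getD j 0, values.getD (j + 1) 0) := by
  have hlen : (values.zip values.tail).length = values.tail.length := by
    simp [List.length_zip, List.length_tail]
  have hj2 : j < values.tail.length := by omega
  have hj1 : j < values.length := by
    have := List.length_tail (l := values); omega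
  rw [List.getD_eq_getElem _ _ hj, List.getElem_zip]
  have htail : values.tail[j] = values[j + 1]'(by have := List.length_tail (l := values); omega) := by
    simp [List.getElem_tail]
  rw [List.getD_eq_getElem _ _ hj1, List.getD_eq_getElem _ _ (by have := List.length_tail (l := values); omega), htail]

-- A's loop body, named for the fold characterisation
def pvAStep (values : List Int) (s : Option Int × Option Int) (i : Int) : Option Int × Option Int :=
  match s.1 with
  | none =>
    if PySem.List.pyGetD values i 0 + 1 = PySem.List.pyGetD values (i + 1) 0 then
      (some i, some (i + 1))
    else s
  | some _ =>
    if PySem.List.pyGetD values i 0 + 1 = PySem.List.pyGetD values (i + 1) 0 then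
      (s.1, some (i + 1))
    else s

-- A's fold over range(0, k) computes the first/last pair indices of the first k pairs
lemma pvFold_char (values : List Int) (k : Nat) (hk : k ≤ (values.zip values.tail).length) :
    (PySem.List.pyRange 0 (k : Int) 1).foldl (pvAStep values) (none, none) =
      ((pvFIdx ((values.zip values.tail).take k)).map (fun j => (j : Int)),
       (pvLIdx ((values.zip values.tail).take k)).map (fun j => (j : Int) + 1)) := by
  induction k with
  | zero => simp [PySem.List.pyRange_one_eq_nil, pvFIdx, pvLIdx]
  | succ k ih =>
    have hk' : k ≤ (values.zip values.tail).length := by omega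
    have hkl : k < (values.zip values.tail).length := by omega
    have hrange : PySem.List.pyRange 0 ((k : Int) + 1) 1 =
        PySem.List.pyRange 0 (k : Int) 1 ++ [(k : Int)] := by
      exact PySem.List.pyRange_one_succ_right (by positivity)
    have htake : (values.zip values.tail).take (k + 1) =
        (values.zip values.tail).take k ++ [(values.zip values.tail)[k]] := by
      rw [List.take_add_one, List.getElem?_eq_getElem hkl]; rfl
    have hpair : (values.zip values.tail).getD k (0, 0) = (values.getD k 0, values.getD (k + 1) 0) :=
      pvPairs_getD values k hkl
    have hgk : (values.zip values.tail)[k] = (values.getD k 0, values.getD (k + 1) 0) := by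
      rw [← List.getD_eq_getElem _ (0, 0) hkl, hpair]
    have hlen_take : ((values.zip values.tail).take k).length = k := List.length_take_of_le hk'
    have hget1 : PySem.List.pyGetD values ((k : Int)) 0 = values.getD k 0 :=
      PySem.List.pyGetD_natCast ..
    have hget2 : PySem.List.pyGetD values ((k : Int) + 1) 0 = values.getD (k + 1) 0 := by
      have hcast : ((k : Int) + 1) = ((k + 1 : Nat) : Int) := by push_cast; ring
      rw [hcast, PySem.List.pyGetD_natCast]
    push_cast [hrange]
    rw [List.foldl_append, ih hk', htake, pvFIdx_snoc, pvLIdx_snoc, hgk]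
    simp only [List.foldl_cons, List.foldl_nil, hlen_take]
    cases hf : pvFIdx ((values.zip values.tail).take k) with
    | none =>
      have hl : pvLIdx ((values.zip values.tail).take k) = none :=
        (pvFIdx_none_iff_pvLIdx_none _).mp hf
      rw [hl]
      simp only [pvAStep, hget1, hget2]
      by_cases hcond : values.getD k 0 + 1 = values.getD (k + 1) 0
      all_goals (simp [List.getD_eq_getElem?_getD] at hcond; simp [hcond])
    | some f =>
      simp only [pvAStep, hget1, hget2]
      by_cases hcond : values.getD k 0 + 1 = values.getD (k + 1) 0
      all_goals (simp [List.getD_eq_getElem?_getD] at hcond; simp [hcond])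

lemma pvPre_iff_fIdx_isSome (values : List Int) :
    Pre_find_contiguous_values values ↔ (pvFIdx (values.zip values.tail)).isSome := by
  unfold Pre_find_contiguous_values
  generalize values.zip values.tail = l
  induction l with
  | nil => simp [pvFIdx]
  | cons p r ih =>
    simp only [pvFIdx]
    constructor
    · rintro ⟨q, hq, hm⟩
      rcases List.mem_cons.mp hq with rfl | hq'
      · simp [hm]
      · split
        · simp
        · simpa using ih.mp ⟨q, hq', hm⟩
    · intro h
      split at h
      · exact ⟨p, List.mem_cons_self, by assumption⟩
      · obtain ⟨q, hq, hm⟩ := ih.mpr (by simpa using h)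
        exact ⟨q, List.mem_cons_of_mem _ hq, hm⟩

-- ===== VERDICT (by name: the statement is the Claim_ definition above) =====
theorem find_contiguous_values_spec : Claim_equal_find_contiguous_values := by
  intro values _ hpre
  unfold Spec_find_contiguous_values find_contiguous_values find_contiguous_values_alt
  have hsome := (pvPre_iff_fIdx_isSome values).mp hpre
  obtain ⟨f, hf⟩ := Option.isSome_iff_exists.mp hsome
  have hne : values.zip values.tail ≠ [] := by
    intro h0; rw [h0] at hf; simp [pvFIdx] at hf
  have hlz : (values.zip values.tail).length = min values.length values.tail.length := List.length_zip
  have ht : values.tail.length = values.length - 1 := List.length_tail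
  have hpos : 0 < (values.zip values.tail).length := List.length_pos_iff.mpr hne
  have hbound : ((values.length : Int) - 1) = (((values.zip values.tail).length : Nat) : Int) := by
    omega
  have hfold := pvFold_char values (values.zip values.tail).length (le_refl _)
  rw [List.take_length] at hfold
  obtain ⟨g, hg⟩ : ∃ g, pvLIdx (values.zip values.tail) = some g := by
    cases hlv : pvLIdx (values.zip values.tail) with
    | none => rw [← pvFIdx_none_iff_pvLIdx_none] at hlv; simp [hlv] at hf
    | some g => exact ⟨g, rfl⟩
  have hstep : (PySem.List.pyRange 0 ((values.length : Int) - 1) 1).foldl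
      (fun (s : Option Int × Option Int) i =>
        match s.1 with
        | none =>
          if PySem.List.pyGetD values i 0 + 1 = PySem.List.pyGetD values (i + 1) 0 then
            (some i, some (i + 1))
          else s
        | some _ =>
          if PySem.List.pyGetD values i 0 + 1 = PySem.List.pyGetD values (i + 1) 0 then
            (s.1, some (i + 1))
          else s) (none, none) =
      ((pvFIdx (values.zip values.tail)).map (fun j => (j : Int)),
       (pvLIdx (values.zip values.tail)).map (fun j => (j : Int) + 1)) := by
    rw [hbound]; exact hfold
  simp only [hstep, hf, hg]
  rw [pvFirstHit_eq, pvLastHit_reverse_eq, hf, hg]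
  have hflt : f < (values.zip values.tail).length := pvFIdx_lt hf
  have hglt : g < (values.zip values.tail).length := pvLIdx_lt hg
  have hpf := pvPairs_getD values f hflt
  have hpg := pvPairs_getD values g hglt
  have h1 : PySem.List.pyGetD values ((f : Nat) : Int) 0 = values.getD f 0 :=
    PySem.List.pyGetD_natCast ..
  have h2 : PySem.List.pyGetD values ((g : Int) + 1) 0 = values.getD (g + 1) 0 := by
    have hcast : ((g : Int) + 1) = ((g + 1 : Nat) : Int) := by push_cast; ring
    rw [hcast, PySem.List.pyGetD_natCast]
  simp only [List.getD_eq_getElem?_getD] at hpf hpg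
  simp [hpf, hpg, h1, h2]
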